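-- pv_equiv track=rewrite | github.com/ManoAndriasat/reconnaissance_language_code | generate_langage.py | sardinas
-- ===== SOURCE A (Python) =====
-- def prefix(l, p):
--     result = []
--     for pref in p:
--         for mot in l:
--             if pref == mot[:len(pref)]:
--                 suffix = mot[len(pref):]
--                 if suffix:
--                     result.append(suffix)
--     return result
--
-- def sardinas(l):
--     l1 = prefix(l, l)
--     result = [l1]
--     a = 5
--     while a > 1:
--         last_set = result[-1]
--         one = prefix(last_set, l)
--         two = prefix(l, last_set)
--         ensemble = one + two
--         if not ensemble:
--             return result, 0
--         if any(word in l for word in ensemble):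
--             return result, 1
--         result.append(ensemble)
--         a -= 1
--     return result, 1
-- ===== SOURCE B (Python) =====
-- def _index(words):
--     # map: proper prefix q of some word -> [word[len(q):] for word in words if word.startswith(q)], in words order
--     d = {}
--     for mot in words:
--         for i in range(len(mot)):
--             d.setdefault(mot[:i], []).append(mot[i:])
--     return d
--
-- def _danglers(idx, prefs):
--     out = []
--     for q in prefs:
--         out.extend(idx.get(q, []))
--     return out
--
-- def sardinas(l):
--     idx_l = _index(l)
--     wordset = set(l)
--     current = _danglers(idx_l, l)
--     result = [current]
--     for _ in range(4):
--         ensemble = _danglers(_index(current), l) + _danglers(idx_l, current)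
--         if not ensemble:
--             return result, 0
--         if any(w in wordset for w in ensemble):
--             return result, 1
--         result.append(ensemble)
--         current = ensemble
--     return result, 1
-- ===== Notes on version B (the rewrite author's own statement) =====
-- stated objective: faster
-- what changed: Instead of re-scanning the whole word list for every prefix (A's prefix() inner loop), B builds a dict index from every proper prefix of a word to its list of suffixes once per word list, so each prefix query becomes a single hash lookup; the word-membership test uses a precomputed set.
import Mathlib
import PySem

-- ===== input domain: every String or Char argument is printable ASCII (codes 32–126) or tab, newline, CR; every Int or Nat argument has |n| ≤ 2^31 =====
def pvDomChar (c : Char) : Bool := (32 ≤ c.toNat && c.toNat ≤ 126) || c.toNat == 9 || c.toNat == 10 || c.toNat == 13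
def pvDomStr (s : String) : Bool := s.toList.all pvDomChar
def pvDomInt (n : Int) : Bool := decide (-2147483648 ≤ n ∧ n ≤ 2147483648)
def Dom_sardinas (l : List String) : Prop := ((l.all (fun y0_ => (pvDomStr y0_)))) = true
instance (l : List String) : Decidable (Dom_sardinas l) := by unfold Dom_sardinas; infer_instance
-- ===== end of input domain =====

-- B replaces A's per-prefix linear scan of the word list by a prefix→suffixes index (dict) built once
-- per word list, so each prefix is answered by one lookup; objective: faster (constant/asymptotic in the scan).

-- ===== PORT A =====
-- prefix(l, p): for each pref in p, scan every word of l for pref as a proper prefix, collect suffixes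
def prefixA (l p : List String) : List String :=
  p.foldl (fun result pref =>
    l.foldl (fun result mot =>
      if pref = PySem.Str.slice mot none (some (PySem.Str.len pref)) then
        let suffix := PySem.Str.slice mot (some (PySem.Str.len pref)) none
        if suffix ≠ "" then result ++ [suffix] else result
      else result) result) []

-- the 'while a > 1' loop: a starts at 5 and is decremented, so it runs at most a-1 = 4 times (fuel)
def sardinasLoopA (l : List String) (result : List (List String)) : Nat → List (List String) × Int
  | 0 => (result, 1)
  | n+1 =>
    let last_set := PySem.List.pyGetD result (-1) []   -- result[-1]; result is nonempty throughout, so exact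
    let ensemble := prefixA last_set l ++ prefixA l last_set
    if ensemble = [] then (result, 0)
    else if ensemble.any (fun w => l.contains w) then (result, 1)
    else sardinasLoopA l (result ++ [ensemble]) n

def sardinas (l : List String) : List (List String) × Int :=
  sardinasLoopA l [prefixA l l] 4

-- ===== PORT B =====
-- index: every proper prefix q of a word maps to the list of matching suffixes, in word-list order
def buildIndex (words : List String) : PySem.Dict String (List String) :=
  words.foldl (fun d mot =>
    (PySem.List.pyRange 0 (PySem.Str.len mot) 1).foldl (fun d i =>
      d.modify (PySem.Str.slice mot none (some i)) []
        (· ++ [PySem.Str.slice mot (some i) none])) d)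
    PySem.Dict.empty

def danglers (idx : PySem.Dict String (List String)) (prefs : List String) : List String :=
  prefs.foldl (fun out q => out ++ idx.getD q []) []

def sardinasLoopB (l : List String) (idxl : PySem.Dict String (List String))
    (wordset : PySem.Set String) (result : List (List String)) (current : List String) :
    Nat → List (List String) × Int
  | 0 => (result, 1)
  | n+1 =>
    let ensemble := danglers (buildIndex current) l ++ danglers idxl current
    if ensemble = [] then (result, 0)
    else if ensemble.any (fun w => PySem.Set.contains wordset w) then (result, 1)
    else sardinasLoopB l idxl wordset (result ++ [ensemble]) ensemble n

def sardinas_alt (l : List String) : List (List String) × Int :=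
  let idxl := buildIndex l
  let current := danglers idxl l
  sardinasLoopB l idxl (PySem.Set.ofList l) [current] current 4

-- ===== PRECONDITION & SPEC =====
def Spec_sardinas (l : List String) (out : List (List String) × Int) : Prop := out = sardinas_alt l
instance (l : List String) (out : List (List String) × Int) : Decidable (Spec_sardinas l out) := by unfold Spec_sardinas; infer_instance

-- ===== CLAIM (what is proved, stated in full; the proofs are below) =====
def Claim_equal_sardinas : Prop := ∀ (l : List String), Dom_sardinas l → Spec_sardinas l (sardinas l)

-- ===== LEMMAS AND PROOFS =====

-- combined match condition and suffix of A's inner scan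
def hit (q mot : String) : Bool :=
  decide (q = PySem.Str.slice mot none (some (PySem.Str.len q)) ∧
          PySem.Str.slice mot (some (PySem.Str.len q)) none ≠ "")

def suf (q mot : String) : String := PySem.Str.slice mot (some (PySem.Str.len q)) none

lemma innerA_eq (l : List String) (q : String) (acc : List String) :
    l.foldl (fun result mot =>
      if q = PySem.Str.slice mot none (some (PySem.Str.len q)) then
        let suffix := PySem.Str.slice mot (some (PySem.Str.len q)) none
        if suffix ≠ "" then result ++ [suffix] else result
      else result) acc = acc ++ (l.filter (hit q)).map (suf q) := by
  induction l generalizing acc with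
  | nil => simp
  | cons mot ms ih =>
    simp only [List.foldl_cons, ih, List.filter_cons]
    by_cases h1 : q = PySem.Str.slice mot none (some (PySem.Str.len q))
    · by_cases h2 : PySem.Str.slice mot (some (PySem.Str.len q)) none = ""
      · have hh : hit q mot = false := decide_eq_false (fun hc => hc.2 h2)
        have h2' : PySem.Str.slice mot (some ((q.length : Int))) none = "" := by
          simpa using h2
        rw [if_pos h1]
        simp [hh, h2']
      · have hh : hit q mot = true := decide_eq_true ⟨h1, h2⟩
        have h2' : ¬ PySem.Str.slice mot (some ((q.length : Int))) none = "" := by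
          simpa using h2
        rw [if_pos h1]
        simp [hh, h2', suf]
    · have hh : hit q mot = false := decide_eq_false (fun hc => h1 hc.1)
      rw [if_neg h1]
      simp [hh]

lemma prefixA_eq (l p : List String) :
    prefixA l p = p.flatMap (fun q => (l.filter (hit q)).map (suf q)) := by
  unfold prefixA
  refine Eq.trans
    (PySem.List.foldl_congr_mem p _ (fun acc q => acc ++ (l.filter (hit q)).map (suf q)) []
      (fun acc x _ => innerA_eq l x acc)) ?_
  rw [PySem.List.foldl_append_eq_flatMap]
  simp

def pairs (mot : String) : List (String × String) :=
  (List.range mot.toList.length).map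
    (fun (j : Nat) => (PySem.Str.slice mot none (some (j:Int)), PySem.Str.slice mot (some (j:Int)) none))

lemma innerB_eq (d : PySem.Dict String (List String)) (mot : String) :
    (PySem.List.pyRange 0 (PySem.Str.len mot) 1).foldl (fun d i =>
      d.modify (PySem.Str.slice mot none (some i)) []
        (· ++ [PySem.Str.slice mot (some i) none])) d
    = (pairs mot).foldl (fun d p => d.modify p.1 [] (· ++ [p.2])) d := by
  have hlen : PySem.Str.len mot = ((mot.toList.length : Nat) : Int) := by simp [pysem]
  rw [hlen, PySem.List.pyRange_zero_nat, List.foldl_map]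
  unfold pairs
  rw [List.foldl_map]

lemma buildIndex_eq (words : List String) :
    buildIndex words =
      (words.flatMap pairs).foldl (fun d p => d.modify p.1 [] (· ++ [p.2])) PySem.Dict.empty := by
  unfold buildIndex
  rw [List.foldl_flatMap]
  exact PySem.List.foldl_congr_mem words _ _ PySem.Dict.empty (fun d mot _ => innerB_eq d mot)

lemma perWord_aux (q mot : String) (js : List Nat) :
    ((js.map (fun (j : Nat) => (PySem.Str.slice mot none (some (j:Int)),
        PySem.Str.slice mot (some (j:Int)) none))).filter (fun p => p.1 == q)).map (fun p => p.2)
    = (js.filter (fun (j : Nat) => decide (mot.toList.take j = q.toList))).map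
        (fun (j : Nat) => PySem.Str.slice mot (some (j:Int)) none) := by
  induction js with
  | nil => rfl
  | cons j js ih =>
    have hiff : (PySem.Str.slice mot none (some (j:Int)) = q) ↔ (mot.toList.take j = q.toList) := by
      rw [← String.toList_inj]
      simp [pysem]
    simp only [List.map_cons, List.filter_cons]
    by_cases h : mot.toList.take j = q.toList
    · have hb : (PySem.Str.slice mot none (some (j:Int)) == q) = true := by
        simp [hiff, h]
      simp [hb, h, ih]
    · have hb : (PySem.Str.slice mot none (some (j:Int)) == q) = false := by
        simp [hiff, h]
      simp [hb, h, ih]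

lemma filter_range_eq_single (n k : Nat) (h : k < n) :
    (List.range n).filter (fun j => j == k) = [k] := by
  induction n with
  | zero => omega
  | succ n ih =>
    rw [List.range_succ, List.filter_append]
    by_cases hk : k < n
    · rw [ih hk]
      have hne : ¬ (n == k) = true := by simp; omega
      simp [hne]
    · have hkn : k = n := by omega
      subst hkn
      have hnil : (List.range k).filter (fun j => j == k) = [] := by
        rw [List.filter_eq_nil_iff]
        intro j hj
        simp only [List.mem_range] at hj
        simp
        omega
      simp [hnil]

lemma perWord (q mot : String) :
    ((pairs mot).filter (fun p => p.1 == q)).map (·.2) =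
      if hit q mot then [suf q mot] else [] := by
  unfold pairs
  rw [perWord_aux]
  by_cases hc : mot.toList.take q.toList.length = q.toList ∧ q.toList.length < mot.toList.length
  · have hf : (List.range mot.toList.length).filter
        (fun j => decide (mot.toList.take j = q.toList)) = [q.toList.length] := by
      have h2 : ∀ j ∈ List.range mot.toList.length,
          (decide (mot.toList.take j = q.toList) : Bool) = (j == q.toList.length) := by
        intro j hj
        simp only [List.mem_range] at hj
        by_cases hje : j = q.toList.length
        · subst hje
          rw [hc.1, beq_self_eq_true]
          exact decide_eq_true rfl
        · have hb : (j == q.toList.length) = false := beq_eq_false_iff_ne.mpr hje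
          rw [hb]
          apply decide_eq_false
          intro heq
          apply hje
          have hl := congrArg List.length heq
          simp only [List.length_take] at hl
          omega
      rw [List.filter_congr h2]
      exact filter_range_eq_single _ _ hc.2
    rw [hf]
    have hhit : hit q mot = true := by
      apply decide_eq_true
      constructor
      · rw [← String.toList_inj]
        simp only [pysem]
        simpa using hc.1.symm
      · intro hemp
        rw [← String.toList_inj] at hemp
        simp only [pysem] at hemp
        rw [show ("" : String).toList = ([] : List Char) from rfl, List.drop_eq_nil_iff] at hemp
        have hq : q.toList.length = q.length := by simp
        have h2 := hc.2
        omega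
    simp only [hhit, if_true, List.map_cons, List.map_nil, suf]
    rw [show ((q.toList.length : Nat) : Int) = PySem.Str.len q from by simp [pysem]]
  · have hf : (List.range mot.toList.length).filter
        (fun j => decide (mot.toList.take j = q.toList)) = [] := by
      rw [List.filter_eq_nil_iff]
      intro j hj
      simp only [List.mem_range] at hj
      simp only [decide_eq_true_eq]
      intro heq
      apply hc
      have hlen : j = q.toList.length := by
        have hl := congrArg List.length heq
        simp only [List.length_take] at hl
        omega
      exact ⟨by rw [← hlen]; exact heq, by omega⟩
    rw [hf]
    have hhit : hit q mot = false := by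
      apply decide_eq_false
      rintro ⟨he, hne⟩
      apply hc
      rw [← String.toList_inj] at he
      simp only [pysem] at he
      have hne' : ¬ mot.toList.drop q.length = [] := by
        intro h0
        apply hne
        rw [← String.toList_inj]
        simp [pysem, h0]
      rw [List.drop_eq_nil_iff] at hne'
      have hq : q.toList.length = q.length := by simp
      constructor
      · rw [hq]
        exact he.symm
      · omega
    simp [hhit]

lemma flatMap_if_singleton (p : String → Bool) (f : String → String) (l : List String) :
    l.flatMap (fun x => if p x then [f x] else []) = (l.filter p).map f := by
  induction l with
  | nil => rfl
  | cons a l ih => by_cases h : p a <;> simp [h, ih]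

lemma getD_buildIndex (words : List String) (q : String) :
    (buildIndex words).getD q [] = (words.filter (hit q)).map (suf q) := by
  rw [buildIndex_eq, PySem.Dict.getD_foldl_modify_append, List.filter_flatMap, List.map_flatMap]
  simp only [PySem.Dict.getD_empty, List.nil_append]
  simp only [perWord]
  exact flatMap_if_singleton (hit q) (suf q) words

lemma danglers_eq (words prefs : List String) :
    danglers (buildIndex words) prefs = prefixA words prefs := by
  unfold danglers
  rw [PySem.List.foldl_append_eq_flatMap, prefixA_eq]
  simp only [getD_buildIndex, List.nil_append]

lemma loop_eq (l : List String) :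
    ∀ (n : Nat) (result : List (List String)) (current : List String)
      (h : result ≠ []) (_ : result.getLast h = current),
      sardinasLoopA l result n =
        sardinasLoopB l (buildIndex l) (PySem.Set.ofList l) result current n := by
  intro n
  induction n with
  | zero => intro result current h hlast; rfl
  | succ n ih =>
    intro result current h hlast
    simp only [sardinasLoopA, sardinasLoopB]
    have hl : PySem.List.pyGetD result (-1) ([] : List String) = current := by
      rw [PySem.List.pyGetD_neg_one result ([] : List String) h]; exact hlast
    have hany : (fun w => PySem.Set.contains (PySem.Set.ofList l) w) = (fun w => l.contains w) := by
      funext w; simp [PySem.Set.contains, PySem.Set.mem_ofList]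
    rw [hl, danglers_eq current l, danglers_eq l current, hany]
    split_ifs with h1 h2
    · rfl
    · rfl
    · exact ih (result ++ [prefixA current l ++ prefixA l current])
        (prefixA current l ++ prefixA l current) (by simp)
        List.getLast_concat

-- ===== VERDICT (by name: the statement is the Claim_ definition above) =====
theorem sardinas_spec : Claim_equal_sardinas := by
  intro l _
  unfold Spec_sardinas sardinas sardinas_alt
  simp only []
  show _ = sardinasLoopB l (buildIndex l) (PySem.Set.ofList l) [danglers (buildIndex l) l] (danglers (buildIndex l) l) 4
  rw [danglers_eq l l]
  exact loop_eq l 4 [prefixA l l] (prefixA l l) (by simp) (by simp)
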